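-- pv_equiv track=rewrite | github.com/Lajnold/adventofcode2019 | day04/day04.py | matches_criteria_part2
-- ===== SOURCE A (Python) =====
-- password_range = (240920, 789857)
--
-- def matches_criteria_part2(num):
--     # The value is within the given range.
--     if num < password_range[0] or num > password_range[1]:
--         return False
--
--     # Two adjacent digits are the same. There must be two same adjacent digits not part of a
--     # larger group; larger groups don't count.
--     adjacent = False
--     as_str = str(num)
--     for i in range(len(as_str) - 1):
--         chr = as_str[i]
--         if (chr == as_str[i + 1]
--                 and (i == 0 or chr != as_str[i - 1])
--                 and (i == len(as_str) - 2 or chr != as_str[i + 2])):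
--             adjacent = True
--     if not adjacent:
--         return False
--
--     # Going from left to right, the digits never decrease.
--     decreases = False
--     for i in range(len(as_str) - 1):
--         if as_str[i] > as_str[i + 1]:
--             decreases = True
--     if decreases:
--         return False
--
--     return True
-- ===== SOURCE B (Python) =====
-- password_range = (240920, 789857)
--
-- def matches_criteria_part2(num):
--     if num < password_range[0] or num > password_range[1]:
--         return False
--     s = str(num)
--     # Going left to right, digits never decrease.
--     if any(a > b for a, b in zip(s, s[1:])):
--         return False
--     # Run-length encode consecutive equal digits (most recent run at runs[-1]);
--     # part 2 needs some run of length exactly 2.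
--     runs = []
--     for ch in s:
--         if runs and runs[-1][0] == ch:
--             runs[-1][1] += 1
--         else:
--             runs.append([ch, 1])
--     return any(n == 2 for _, n in runs)
-- ===== Notes on version B (the rewrite author's own statement) =====
-- stated objective: alternative
-- what changed: Replaces A's two index-based flag loops (neighbour-guard scan for an isolated adjacent pair, then a decreasing-digit scan) by a run-length encoding of str(num) checked for a run of length exactly two, plus a single pairwise zip test of consecutive digits for non-decreasing order with early return.
import Mathlib
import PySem

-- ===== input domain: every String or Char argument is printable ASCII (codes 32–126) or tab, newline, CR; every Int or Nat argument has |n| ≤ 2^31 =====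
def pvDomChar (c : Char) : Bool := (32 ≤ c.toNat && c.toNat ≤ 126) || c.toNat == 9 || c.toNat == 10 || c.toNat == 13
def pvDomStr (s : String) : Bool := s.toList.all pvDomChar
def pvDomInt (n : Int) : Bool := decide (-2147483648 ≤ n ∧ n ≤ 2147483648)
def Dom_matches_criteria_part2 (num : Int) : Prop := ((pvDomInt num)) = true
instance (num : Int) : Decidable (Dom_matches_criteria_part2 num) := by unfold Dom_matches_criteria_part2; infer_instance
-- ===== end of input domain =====

-- B replaces A's index loops by a run-length encoding of str(num) (some run of length exactly 2)
-- plus a pairwise zip test for non-decreasing digits; objective: alternative.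

-- ===== PORT A =====
def matches_criteria_part2 (num : Int) : Bool :=
  if num < 240920 || num > 789857 then false
  else
    let as_str := PySem.Int.toChars num
    let n : Int := PySem.List.len as_str
    let adjacent := (PySem.List.pyRange 0 (n - 1) 1).foldl (fun adjacent i =>
      if PySem.List.pyGetD as_str i ' ' == PySem.List.pyGetD as_str (i + 1) ' '
          && (i == 0 || PySem.List.pyGetD as_str i ' ' != PySem.List.pyGetD as_str (i - 1) ' ')
          && (i == n - 2 || PySem.List.pyGetD as_str i ' ' != PySem.List.pyGetD as_str (i + 2) ' ')
      then true else adjacent) false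
    if !adjacent then false
    else
      let decreases := (PySem.List.pyRange 0 (n - 1) 1).foldl (fun decreases i =>
        if PySem.List.pyGetD as_str (i + 1) ' ' < PySem.List.pyGetD as_str i ' '
        then true else decreases) false
      if decreases then false else true

-- ===== PORT B =====
-- B's loop body: runs are kept with the most recent run at the head (Python's runs[-1]).
def runsStep (runs : List (Char × Nat)) (ch : Char) : List (Char × Nat) :=
  match runs with
  | (c, k) :: rest => if c == ch then (c, k + 1) :: rest else (ch, 1) :: (c, k) :: rest
  | [] => [(ch, 1)]

def matches_criteria_part2_alt (num : Int) : Bool :=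
  if num < 240920 || num > 789857 then false
  else
    let s := PySem.Int.toChars num
    if (s.zip (PySem.List.slice s (some 1) none)).any (fun p => decide (p.2 < p.1)) then false
    else (s.foldl runsStep []).any (fun r => r.2 == 2)

-- ===== PRECONDITION & SPEC =====
def Spec_matches_criteria_part2 (num : Int) (out : Bool) : Prop := out = matches_criteria_part2_alt num
instance (num : Int) (out : Bool) : Decidable (Spec_matches_criteria_part2 num out) := by unfold Spec_matches_criteria_part2; infer_instance

-- ===== CLAIM (what is proved, stated in full; the proofs are below) =====
def Claim_equal_matches_criteria_part2 : Prop := ∀ (num : Int), Dom_matches_criteria_part2 num → Spec_matches_criteria_part2 num (matches_criteria_part2 num)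

-- ===== LEMMAS AND PROOFS =====

-- A's adjacent loop, as a structural recursion carrying the previous character.
def adjRec : Option Char → List Char → Bool
  | _, [] => false
  | _, [_] => false
  | prev, a :: b :: t =>
      ((a == b) && decide (prev ≠ some a) && decide (t.head? ≠ some a)) || adjRec (some a) (b :: t)

-- B's run scan: current run char c counted n times so far; true iff some run has length 2.
def runAny : Char → Nat → List Char → Bool
  | _, n, [] => n == 2
  | c, n, x :: t => if c == x then runAny c (n + 1) t else ((n == 2) || runAny x 1 t)

-- A's index condition at Nat index k, with an explicit previous-character parameter.
def condN (s : List Char) (prev : Option Char) (k : Nat) : Bool :=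
  (s.getD k ' ' == s.getD (k + 1) ' ')
  && (if k == 0 then decide (prev ≠ some (s.getD 0 ' ')) else s.getD k ' ' != s.getD (k - 1) ' ')
  && (k == s.length - 2 || s.getD k ' ' != s.getD (k + 2) ' ')

def condD (s : List Char) (k : Nat) : Bool :=
  decide (s.getD (k + 1) ' ' < s.getD k ' ')

theorem foldl_flag {α : Type} (xs : List α) (p : α → Bool) (b : Bool) :
    xs.foldl (fun acc i => if p i then true else acc) b = (b || xs.any p) := by
  induction xs generalizing b with
  | nil => simp
  | cons x xs ih =>
    have h : (if p x = true then true else b) = (b || p x) := by cases p x <;> simp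
    simp only [List.foldl_cons, h, ih, List.any_cons]
    cases b <;> cases p x <;> simp

theorem foldl_flag' {α : Type} (xs : List α) (p : α → Prop) [DecidablePred p] (b : Bool) :
    xs.foldl (fun acc i => if p i then true else acc) b
      = (b || xs.any (fun i => decide (p i))) := by
  induction xs generalizing b with
  | nil => simp
  | cons x xs ih =>
    have h : (if p x then true else b) = (b || decide (p x)) := by
      by_cases hp : p x <;> simp [hp]
    simp only [List.foldl_cons, h, ih, List.any_cons]
    cases b <;> by_cases hp : p x <;> simp [hp]

theorem any_range_congr (m : Nat) (p q : Nat → Bool) (h : ∀ k, k < m → p k = q k) :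
    (List.range m).any p = (List.range m).any q := by
  induction m with
  | zero => simp
  | succ m ih =>
    rw [List.range_succ]
    simp only [List.any_append, List.any_cons, List.any_nil]
    rw [ih (fun k hk => h k (by omega)), h m (by omega)]

theorem condN_shift (a b : Char) (t : List Char) (prev : Option Char) (k : Nat)
    (hk : k < t.length) :
    condN (a :: b :: t) prev (k + 1) = condN (b :: t) (some a) k := by
  simp only [condN, List.getD_cons_succ, List.length_cons, Nat.add_sub_cancel]
  have h3 : ((k + 1 == t.length + 2 - 2) : Bool) = ((k == t.length + 1 - 2) : Bool) := by
    rw [Bool.eq_iff_iff]; simp only [beq_iff_eq]; omega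
  rw [h3]
  cases k with
  | zero =>
    simp only [List.getD_cons_zero, bne]
    by_cases hba : b = a
    · simp [hba]
    · have h1 : (b == a) = false := by simpa using hba
      have h2 : decide (a = b) = false := by simpa using Ne.symm hba
      simp [h1, h2]
  | succ j => simp

theorem L1 (s : List Char) (prev : Option Char) :
    (List.range (s.length - 1)).any (condN s prev) = adjRec prev s := by
  induction s generalizing prev with
  | nil => simp [adjRec]
  | cons a s ih =>
    cases s with
    | nil => simp [adjRec]
    | cons b t =>
      have hlen : (a :: b :: t).length - 1 = t.length + 1 := by simp
      rw [hlen, List.range_succ_eq_map]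
      simp only [List.any_cons, List.any_map, Function.comp_def]
      have h0 : condN (a :: b :: t) prev 0
          = ((a == b) && decide (prev ≠ some a) && decide (t.head? ≠ some a)) := by
        cases t with
        | nil => simp [condN]
        | cons c t' =>
          have hlen2 : (a :: b :: c :: t').length - 2 = t'.length + 1 := by simp
          simp only [condN, List.getD_cons_zero, List.getD_cons_succ, List.head?_cons,
            hlen2, bne]
          have h : ((0 == t'.length + 1) : Bool) = false := by
            rw [beq_eq_false_iff_ne]; omega
          rw [h]
          have h2 : (decide (c = a)) = (a == c) := by
            by_cases hac : a = c
            · simp [hac]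
            · have h1 : (a == c) = false := by simpa using hac
              simp [h1, Ne.symm hac]
          simp [h2]
      have hsh : ((List.range t.length).any fun k => condN (a :: b :: t) prev (k + 1))
          = (List.range ((b :: t).length - 1)).any (condN (b :: t) (some a)) := by
        simp only [List.length_cons, Nat.add_sub_cancel]
        exact any_range_congr _ _ _ (fun k hk => condN_shift a b t prev k hk)
      rw [h0, hsh, ih (some a)]
      simp [adjRec]

theorem M (t : List Char) (c : Char) (n : Nat) (p : Option Char) (hp : p ≠ some c) (hn : 1 ≤ n) :
    runAny c n t
      = (adjRec (if n = 1 then p else some c) (c :: t)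
          || ((n == 2) && decide (t.head? ≠ some c))) := by
  induction t generalizing c n p with
  | nil => split_ifs <;> simp [runAny, adjRec]
  | cons x t' ih =>
    by_cases hx : c = x
    · subst hx
      have hr : runAny c n (c :: t') = runAny c (n + 1) t' := by simp [runAny]
      rw [hr, ih c (n + 1) p hp (by omega)]
      have hn2 : ¬ (n + 1 = 1) := by omega
      by_cases hn1 : n = 1
      · subst hn1
        simp [adjRec, hn2, hp, Bool.or_comm]
      · have hne : ((n + 1 == 2) : Bool) = false := by
          rw [beq_eq_false_iff_ne]; omega
        simp only [if_neg hn2, if_neg hn1, adjRec, hne]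
        simp
    · have hr : runAny c n (x :: t') = ((n == 2) || runAny x 1 t') := by simp [runAny, hx]
      have hcx : some c ≠ some x := by simpa using hx
      rw [hr, ih x 1 (some c) hcx (by omega)]
      have hxc : (c == x) = false := by simpa using hx
      simp [adjRec, hxc, Ne.symm hx, Bool.or_comm]

theorem L4 (s : List Char) (c : Char) (n : Nat) (rest : List (Char × Nat)) :
    ((s.foldl runsStep ((c, n) :: rest)).any (fun r => r.2 == 2))
      = (runAny c n s || rest.any (fun r => r.2 == 2)) := by
  induction s generalizing c n rest with
  | nil => simp [runAny]
  | cons x s' ih =>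
    rw [List.foldl_cons]
    by_cases hx : c = x
    · subst hx
      rw [show runsStep ((c, n) :: rest) c = (c, n + 1) :: rest by simp [runsStep], ih]
      have hr : runAny c n (c :: s') = runAny c (n + 1) s' := by simp [runAny]
      rw [hr]
    · have hxc : (c == x) = false := by simpa using hx
      rw [show runsStep ((c, n) :: rest) x = (x, 1) :: (c, n) :: rest by simp [runsStep, hxc], ih]
      have hr : runAny c n (x :: s') = ((n == 2) || runAny x 1 s') := by simp [runAny, hx]
      rw [hr, List.any_cons]
      cases (n == 2) <;> cases runAny x 1 s' <;> simp

theorem L3 (s : List Char) :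
    (List.range (s.length - 1)).any (condD s)
      = (s.zip s.tail).any (fun p => decide (p.2 < p.1)) := by
  induction s with
  | nil => simp
  | cons a s ih =>
    cases s with
    | nil => simp
    | cons b t =>
      have hlen : (a :: b :: t).length - 1 = t.length + 1 := by simp
      rw [hlen, List.range_succ_eq_map]
      simp only [List.any_cons, List.any_map, Function.comp_def]
      have hsh : ((List.range t.length).any fun k => condD (a :: b :: t) (k + 1))
          = (List.range ((b :: t).length - 1)).any (condD (b :: t)) := by
        simp only [List.length_cons, Nat.add_sub_cancel]
        exact any_range_congr _ _ _ (fun k _ => by simp [condD])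
      rw [hsh, ih]
      simp [condD]

theorem condInt_eq (s : List Char) (k : Nat) (hk : k < s.length - 1) :
    (fun i : Int =>
      PySem.List.pyGetD s i ' ' == PySem.List.pyGetD s (i + 1) ' '
        && (i == 0 || PySem.List.pyGetD s i ' ' != PySem.List.pyGetD s (i - 1) ' ')
        && (i == (PySem.List.len s) - 2
            || PySem.List.pyGetD s i ' ' != PySem.List.pyGetD s (i + 2) ' '))
      ((0 : Int) + (k : Int))
      = condN s none k := by
  simp only [PySem.List.len_eq, zero_add]
  have e1 : ((k : Int) + 1) = ((k + 1 : Nat) : Int) := by push_cast; ring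
  have e2 : ((k : Int) + 2) = ((k + 2 : Nat) : Int) := by push_cast; ring
  rw [e1, e2]
  simp only [PySem.List.pyGetD_natCast]
  have h3 : (((k : Int) == (s.length : Int) - 2) : Bool) = ((k == s.length - 2) : Bool) := by
    rw [Bool.eq_iff_iff]; simp only [beq_iff_eq]; omega
  rw [h3]
  cases k with
  | zero => simp [condN]
  | succ j =>
    have h0 : (((j + 1 : Nat) : Int) == 0) = false := by
      rw [beq_eq_false_iff_ne]; omega
    have hn0 : (((j + 1 : Nat) == 0) : Bool) = false := by
      rw [beq_eq_false_iff_ne]; omega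
    have e3 : (((j + 1 : Nat) : Int) - 1) = ((j : Nat) : Int) := by push_cast; ring
    rw [h0, e3]
    simp only [PySem.List.pyGetD_natCast, condN, hn0]
    simp

theorem condDInt_eq (s : List Char) (k : Nat) :
    (decide (PySem.List.pyGetD s (((0 : Int) + (k : Int)) + 1) ' '
        < PySem.List.pyGetD s ((0 : Int) + (k : Int)) ' '))
      = condD s k := by
  simp only [zero_add]
  have e1 : ((k : Int) + 1) = ((k + 1 : Nat) : Int) := by push_cast; ring
  rw [e1]
  simp only [PySem.List.pyGetD_natCast, condD]

theorem L0adj (s : List Char) :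
    ((PySem.List.pyRange 0 (PySem.List.len s - 1) 1).foldl (fun adjacent i =>
      if PySem.List.pyGetD s i ' ' == PySem.List.pyGetD s (i + 1) ' '
          && (i == 0 || PySem.List.pyGetD s i ' ' != PySem.List.pyGetD s (i - 1) ' ')
          && (i == PySem.List.len s - 2
              || PySem.List.pyGetD s i ' ' != PySem.List.pyGetD s (i + 2) ' ')
      then true else adjacent) false)
      = adjRec none s := by
  rw [foldl_flag, PySem.List.pyRange_one]
  have ht : (PySem.List.len s - 1 - 0).toNat = s.length - 1 := by
    simp only [PySem.List.len_eq]; omega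
  rw [ht]
  simp only [Bool.false_or, List.any_map, Function.comp_def]
  rw [any_range_congr _ _ _ (fun k hk => condInt_eq s k hk), L1]

theorem L0dec (s : List Char) :
    ((PySem.List.pyRange 0 (PySem.List.len s - 1) 1).foldl (fun decreases i =>
      if PySem.List.pyGetD s (i + 1) ' ' < PySem.List.pyGetD s i ' '
      then true else decreases) false)
      = (s.zip s.tail).any (fun p => decide (p.2 < p.1)) := by
  rw [foldl_flag', PySem.List.pyRange_one]
  have ht : (PySem.List.len s - 1 - 0).toNat = s.length - 1 := by
    simp only [PySem.List.len_eq]; omega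
  rw [ht]
  simp only [Bool.false_or, List.any_map, Function.comp_def]
  rw [any_range_congr _ _ _ (fun k _ => condDInt_eq s k), L3]

theorem runsB_eq (s : List Char) :
    ((s.foldl runsStep []).any (fun r => r.2 == 2)) = adjRec none s := by
  cases s with
  | nil => simp [adjRec]
  | cons a t =>
    rw [List.foldl_cons, show runsStep [] a = [(a, 1)] from rfl, L4,
      M t a 1 none (by simp) (by omega)]
    simp

-- ===== VERDICT (by name: the statement is the Claim_ definition above) =====
theorem matches_criteria_part2_spec : Claim_equal_matches_criteria_part2 := by
  intro num _
  unfold Spec_matches_criteria_part2 matches_criteria_part2 matches_criteria_part2_alt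
  by_cases hg : (decide (num < 240920) || decide (num > 789857)) = true
  · rw [if_pos hg, if_pos hg]
  · rw [if_neg hg, if_neg hg]
    simp only [PySem.List.slice_from_one, L0adj, L0dec, runsB_eq]
    cases h1 : adjRec none (PySem.Int.toChars num) <;>
      cases h2 : ((PySem.Int.toChars num).zip (PySem.Int.toChars num).tail).any
        (fun p => decide (p.2 < p.1)) <;> simp
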